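-- pv_equiv track=rewrite | github.com/vasukochhar/ARA-Autonomous-Refactoring-Agent | src/ara/context/rag_context.py | _extract_symbol_usage
-- ===== SOURCE A (Python) =====
-- from typing import Dict, List, Optional, Set, Tuple
--
-- def _extract_symbol_usage(
--
--     content: str,
--     symbol_name: str,
--     context_lines: int = 5,
-- ) -> Optional[str]:
--     """
--     Extract lines around usages of a symbol.
--
--     Args:
--         content: File content
--         symbol_name: Symbol to find
--         context_lines: Number of lines before/after to include
--
--     Returns:
--         Extracted content or None
--     """
--     lines = content.split("\n")
--     relevant_lines: Set[int] = set()
--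
--     for i, line in enumerate(lines):
--         if symbol_name in line:
--             # Add context around the usage
--             start = max(0, i - context_lines)
--             end = min(len(lines), i + context_lines + 1)
--             relevant_lines.update(range(start, end))
--
--     if not relevant_lines:
--         return None
--
--     # Build output with line ranges
--     sorted_lines = sorted(relevant_lines)
--     result_parts = []
--     current_range = [sorted_lines[0], sorted_lines[0]]
--
--     for line_num in sorted_lines[1:]:
--         if line_num == current_range[1] + 1:
--             current_range[1] = line_num
--         else:
--             # Output current range
--             result_parts.append(
--                 f"# Lines {current_range[0]+1}-{current_range[1]+1}:"
--             )
--             result_parts.extend(lines[current_range[0]:current_range[1]+1])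
--             result_parts.append("...")
--             current_range = [line_num, line_num]
--
--     # Output final range
--     result_parts.append(f"# Lines {current_range[0]+1}-{current_range[1]+1}:")
--     result_parts.extend(lines[current_range[0]:current_range[1]+1])
--
--     return "\n".join(result_parts)
-- ===== SOURCE B (Python) =====
-- def _extract_symbol_usage(
--     content: str,
--     symbol_name: str,
--     context_lines: int = 5,
-- ):
--     """Mask-and-run-scan re-implementation: mark matched lines, compute a
--     relevance mask by window lookup, then emit maximal runs in one sweep
--     (no set, no sort, no integer grouping)."""
--     lines = content.split("\n")
--     n = len(lines)
--     matched = [symbol_name in line for line in lines]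
--     mask = [
--         any(matched[max(0, i - context_lines):max(0, min(n, i + context_lines + 1))])
--         for i in range(n)
--     ]
--
--     parts = []
--     start = None
--     buf = []
--     for i, (m, line) in enumerate(zip(mask, lines)):
--         if m:
--             if start is None:
--                 start = i
--             buf.append(line)
--         elif start is not None:
--             _flush(parts, start, buf)
--             start = None
--             buf = []
--     if start is not None:
--         _flush(parts, start, buf)
--
--     if not parts:
--         return None
--     return "\n".join(parts)
--
--
-- def _flush(parts, start, buf):
--     if parts:
--         parts.append("...")
--     parts.append(f"# Lines {start + 1}-{start + len(buf)}:")
--     parts.extend(buf)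
-- ===== Notes on version B (the rewrite author's own statement) =====
-- stated objective: alternative
-- what changed: B replaces A's integer-set accumulation + sort + consecutive-number grouping by a per-line boolean relevance mask (window lookup over matched lines) followed by a single run-scan that emits each maximal masked run directly.
import Mathlib
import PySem

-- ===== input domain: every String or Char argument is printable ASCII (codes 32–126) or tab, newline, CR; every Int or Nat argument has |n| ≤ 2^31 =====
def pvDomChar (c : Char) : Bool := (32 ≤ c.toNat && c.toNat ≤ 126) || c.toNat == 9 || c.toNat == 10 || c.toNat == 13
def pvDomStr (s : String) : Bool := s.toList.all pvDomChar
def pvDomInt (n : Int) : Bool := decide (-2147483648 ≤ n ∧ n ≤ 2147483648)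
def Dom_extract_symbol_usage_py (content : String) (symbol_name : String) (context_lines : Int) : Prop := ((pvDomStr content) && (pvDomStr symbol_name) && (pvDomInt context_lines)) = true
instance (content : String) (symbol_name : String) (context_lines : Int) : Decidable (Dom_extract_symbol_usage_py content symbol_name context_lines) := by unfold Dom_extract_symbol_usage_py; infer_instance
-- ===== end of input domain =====

-- B replaces A's integer-set + sort + consecutive-number grouping by a per-line boolean
-- relevance mask and a single run-scan that emits maximal runs directly (alternative decomposition).

-- ===== PORT A =====
-- A-side helpers: the loop body of the set-building loop, and of the grouping loop (named, otherwise verbatim)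
def pvAstep (symbol_name : String) (context_lines : Int) (N : Int) (s : PySem.Set Int) (p : Int × String) : PySem.Set Int :=
  if PySem.Str.isIn symbol_name p.2 then
    PySem.Set.update s (PySem.List.pyRange (max 0 (p.1 - context_lines)) (min N (p.1 + context_lines + 1)) 1)
  else s

-- "# Lines {a+1}-{b+1}:" followed by lines[a:b+1]
def pvAemit (lines : List String) (a b : Int) : List String :=
  ("# Lines " ++ PySem.Int.toStr (a + 1) ++ "-" ++ PySem.Int.toStr (b + 1) ++ ":")
    :: PySem.List.slice lines (some a) (some (b + 1))

def pvAgstep (lines : List String) (st : List String × Int × Int) (line_num : Int) : List String × Int × Int :=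
  if line_num = st.2.2 + 1 then (st.1, st.2.1, line_num)
  else (st.1 ++ pvAemit lines st.2.1 st.2.2 ++ ["..."], line_num, line_num)

def pvFinishA (lines : List String) (st : List String × Int × Int) : List String :=
  st.1 ++ pvAemit lines st.2.1 st.2.2

def extract_symbol_usage_py (content : String) (symbol_name : String) (context_lines : Int) : Option String :=
  let lines := (PySem.Str.split? content "\n").getD []   -- sep "\n" ≠ "": split? never raises here
  let relevant : PySem.Set Int :=
    (PySem.List.enumerate lines).foldl (pvAstep symbol_name context_lines (lines.length : Int)) PySem.Set.empty
  match PySem.List.sorted relevant (fun x => x) false with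
  | [] => none
  | s0 :: rest =>
    some (PySem.Str.join "\n" (pvFinishA lines (rest.foldl (pvAgstep lines) ([], s0, s0))))

-- ===== PORT B =====
-- B-side helpers: _flush, and the named loop body / final flush of the run-scan
def pvFlush (parts : List String) (start : Int) (buf : List String) : List String :=
  (if parts = [] then parts else parts ++ ["..."]) ++
    ("# Lines " ++ PySem.Int.toStr (start + 1) ++ "-" ++ PySem.Int.toStr (start + (buf.length : Int)) ++ ":") :: buf

def pvBstep (st : List String × Option Int × List String) (p : Int × Bool × String) : List String × Option Int × List String :=
  if p.2.1 then
    (st.1, (match st.2.1 with | none => some p.1 | some s => some s), st.2.2 ++ [p.2.2])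
  else
    match st.2.1 with
    | some start => (pvFlush st.1 start st.2.2, none, [])
    | none => st

def pvFinishB (st : List String × Option Int × List String) : List String :=
  match st.2.1 with
  | some start => pvFlush st.1 start st.2.2
  | none => st.1

def extract_symbol_usage_py_alt (content : String) (symbol_name : String) (context_lines : Int) : Option String :=
  let lines := (PySem.Str.split? content "\n").getD []   -- sep "\n" ≠ "": split? never raises here
  let n : Int := (lines.length : Int)
  let matched := lines.map (fun line => PySem.Str.isIn symbol_name line)
  let mask := (PySem.List.pyRange 0 n 1).map (fun i =>
    (PySem.List.slice matched (some (max 0 (i - context_lines)))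
      (some (max 0 (min n (i + context_lines + 1))))).any id)
  let parts := pvFinishB ((PySem.List.enumerate (List.zip mask lines)).foldl pvBstep ([], none, []))
  if parts = [] then none else some (PySem.Str.join "\n" parts)

-- ===== PRECONDITION & SPEC =====
def Spec_extract_symbol_usage_py (content : String) (symbol_name : String) (context_lines : Int) (out : Option String) : Prop := out = extract_symbol_usage_py_alt content symbol_name context_lines
instance (content : String) (symbol_name : String) (context_lines : Int) (out : Option String) : Decidable (Spec_extract_symbol_usage_py content symbol_name context_lines out) := by unfold Spec_extract_symbol_usage_py; infer_instance

-- ===== CLAIM (what is proved, stated in full; the proofs are below) =====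
def Claim_equal_extract_symbol_usage_py : Prop := ∀ (content : String) (symbol_name : String) (context_lines : Int), Dom_extract_symbol_usage_py content symbol_name context_lines → Spec_extract_symbol_usage_py content symbol_name context_lines (extract_symbol_usage_py content symbol_name context_lines)

-- ===== LEMMAS AND PROOFS =====

-- proof-side vocabulary
def pvMf (symbol_name : String) (context_lines : Int) (lines : List String) (i : Nat) : Bool :=
  (PySem.List.slice (lines.map (fun line => PySem.Str.isIn symbol_name line))
    (some (max 0 ((i : Int) - context_lines)))
    (some (max 0 (min (lines.length : Int) ((i : Int) + context_lines + 1))))).any id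

def pvEmit (lines : List String) (a b : Nat) : List String := pvAemit lines (a : Int) (b : Int)

def pvInter (lines : List String) : List (Nat × Nat) → List String
  | [] => []
  | [(a, b)] => pvEmit lines a b
  | (a, b) :: r :: rs => pvEmit lines a b ++ "..." :: pvInter lines (r :: rs)

def pvDots (lines : List String) : List (Nat × Nat) → List String
  | [] => []
  | r :: rs => "..." :: (pvEmit lines r.1 r.2 ++ pvDots lines rs)

def pvChunksAux (a b : Nat) : List Nat → List (Nat × Nat)
  | [] => [(a, b)]
  | x :: xs => if x = b + 1 then pvChunksAux a x xs else (a, b) :: pvChunksAux x x xs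

def pvChunks : List Nat → List (Nat × Nat)
  | [] => []
  | x :: xs => pvChunksAux x x xs

def pvChunksFrom (m : Nat → Bool) : Option Nat → Nat → Nat → List (Nat × Nat)
  | cur, k, 0 => match cur with | none => [] | some a => [(a, k - 1)]
  | cur, k, r + 1 =>
    if m k then pvChunksFrom m (some (cur.getD k)) (k + 1) r
    else (match cur with | none => [] | some a => [(a, k - 1)]) ++ pvChunksFrom m none (k + 1) r

def pvFlushN (lines : List String) (acc : List String) (r : Nat × Nat) : List String :=
  (if acc = [] then acc else acc ++ ["..."]) ++ pvEmit lines r.1 r.2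

def pvPartsAfter (lines : List String) (ps : List String) (rs : List (Nat × Nat)) : List String :=
  rs.foldl (pvFlushN lines) ps

def pvBuf (lines : List String) (a? : Option Nat) (k : Nat) : List String :=
  match a? with
  | none => []
  | some a => (lines.drop a).take (k - a)

-- ---- basic lemmas ----

lemma pvEmit_eq (lines : List String) (a b : Nat) :
    pvEmit lines a b
      = ("# Lines " ++ PySem.Int.toStr ((a : Int) + 1) ++ "-" ++ PySem.Int.toStr ((b : Int) + 1) ++ ":")
          :: (lines.drop a).take (b + 1 - a) := by
  simp only [pvEmit, pvAemit]
  rw [show ((b : Int) + 1) = (((b + 1 : Nat) : Int)) by push_cast; ring,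
    PySem.List.slice_natCast]

lemma pvEmit_ne_nil (lines : List String) (a b : Nat) : pvEmit lines a b ≠ [] := by
  simp [pvEmit, pvAemit]

lemma pvChunksAux_ne_nil (xs : List Nat) (a b : Nat) : pvChunksAux a b xs ≠ [] := by
  induction xs generalizing a b with
  | nil => simp [pvChunksAux]
  | cons x xs ih => simp only [pvChunksAux]; split <;> [exact ih _ _; simp]

lemma pvInter_cons (lines : List String) (a b : Nat) (rs : List (Nat × Nat)) :
    pvInter lines ((a, b) :: rs) = pvEmit lines a b ++ pvDots lines rs := by
  induction rs generalizing a b with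
  | nil => simp [pvInter, pvDots]
  | cons r rs ih =>
    obtain ⟨c, d⟩ := r
    simp [pvInter, pvDots, ih c d]

lemma pvInter_ne_nil (lines : List String) (rs : List (Nat × Nat)) (h : rs ≠ []) :
    pvInter lines rs ≠ [] := by
  obtain ⟨⟨a, b⟩, rs, rfl⟩ := List.exists_cons_of_ne_nil h
  rw [pvInter_cons]
  simp [pvEmit, pvAemit]

lemma pvPartsAfter_ne (lines : List String) (rs : List (Nat × Nat)) :
    ∀ ps : List String, ps ≠ [] → pvPartsAfter lines ps rs = ps ++ pvDots lines rs := by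
  induction rs with
  | nil => intro ps hps; simp [pvPartsAfter, pvDots]
  | cons r rs ih =>
    intro ps hps
    have hstep : pvFlushN lines ps r = ps ++ "..." :: pvEmit lines r.1 r.2 := by
      simp [pvFlushN, hps]
    have hne : pvFlushN lines ps r ≠ [] := by simp [hstep, hps]
    calc pvPartsAfter lines ps (r :: rs)
        = pvPartsAfter lines (pvFlushN lines ps r) rs := rfl
      _ = pvFlushN lines ps r ++ pvDots lines rs := ih _ hne
      _ = ps ++ pvDots lines (r :: rs) := by simp [hstep, pvDots]

lemma pvPartsAfter_nil (lines : List String) (rs : List (Nat × Nat)) :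
    pvPartsAfter lines [] rs = pvInter lines rs := by
  cases rs with
  | nil => rfl
  | cons r rs =>
    have hstep : pvFlushN lines [] r = pvEmit lines r.1 r.2 := by simp [pvFlushN]
    calc pvPartsAfter lines [] (r :: rs)
        = pvPartsAfter lines (pvFlushN lines [] r) rs := rfl
      _ = pvEmit lines r.1 r.2 ++ pvDots lines rs := by
            rw [hstep]; exact pvPartsAfter_ne lines rs _ (pvEmit_ne_nil lines r.1 r.2)
      _ = pvInter lines (r :: rs) := by
            obtain ⟨a, b⟩ := r; rw [pvInter_cons]

-- ---- A-side: membership, nodup, sorted characterisation ----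

lemma pvMem_foldl (symbol_name : String) (context_lines N : Int) :
    ∀ (l : List (Int × String)) (s : PySem.Set Int) (x : Int),
      x ∈ l.foldl (pvAstep symbol_name context_lines N) s ↔
        x ∈ s ∨ ∃ p ∈ l, PySem.Str.isIn symbol_name p.2 = true ∧
          max 0 (p.1 - context_lines) ≤ x ∧ x < min N (p.1 + context_lines + 1) := by
  intro l
  induction l with
  | nil => intro s x; simp
  | cons p l ih =>
    intro s x
    rw [List.foldl_cons, ih]
    simp only [pvAstep]
    by_cases h : PySem.Str.isIn symbol_name p.2 = true
    · rw [if_pos h]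
      simp only [PySem.Set.mem_update, PySem.List.mem_pyRange_one, List.exists_mem_cons_iff, h,
        true_and]
      tauto
    · rw [if_neg h]
      have h' : PySem.Str.isIn symbol_name p.2 = false := by simpa using h
      simp only [List.exists_mem_cons_iff, h', Bool.false_eq_true, false_and]
      tauto

lemma pvNodup_foldl (symbol_name : String) (context_lines N : Int) :
    ∀ (l : List (Int × String)) (s : PySem.Set Int), s.Nodup →
      (l.foldl (pvAstep symbol_name context_lines N) s).Nodup := by
  intro l
  induction l with
  | nil => intro s hs; exact hs
  | cons p l ih =>
    intro s hs
    rw [List.foldl_cons]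
    apply ih
    unfold pvAstep
    split
    · exact PySem.Set.nodup_update _ _ hs
    · exact hs

lemma pvMf_iff (symbol_name : String) (context_lines : Int) (lines : List String) (i : Nat) :
    pvMf symbol_name context_lines lines i = true ↔
      ∃ j : Nat, ∃ hj : j < lines.length, PySem.Str.isIn symbol_name lines[j] = true ∧
        (j : Int) - context_lines ≤ (i : Int) ∧ (i : Int) ≤ (j : Int) + context_lines := by
  unfold pvMf
  have h0 : (0:Int) ≤ max 0 ((i:Int) - context_lines) := le_max_left _ _
  have h0' : (0:Int) ≤ max 0 (min (lines.length:Int) ((i:Int) + context_lines + 1)) := le_max_left _ _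
  rw [PySem.List.slice_toNat _ h0 h0', List.any_eq_true]
  constructor
  · rintro ⟨x, hx, hid⟩
    rw [List.mem_iff_getElem] at hx
    obtain ⟨m, hm, hxm⟩ := hx
    simp only [List.length_take, List.length_drop, List.length_map] at hm
    simp only [List.getElem_take, List.getElem_drop, List.getElem_map] at hxm
    simp only [id_eq] at hid
    subst hid
    refine ⟨(max 0 ((i:Int) - context_lines)).toNat + m, by omega, hxm, by omega, by omega⟩
  · rintro ⟨j, hj, hin, hb1, hb2⟩
    have hle : (max 0 ((i:Int) - context_lines)).toNat ≤ j := by omega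
    refine ⟨true, ?_, rfl⟩
    rw [List.mem_iff_getElem]
    refine ⟨j - (max 0 ((i:Int) - context_lines)).toNat, ?_, ?_⟩
    · simp only [List.length_take, List.length_drop, List.length_map]
      omega
    · simp only [List.getElem_take, List.getElem_drop, List.getElem_map,
        Nat.add_sub_cancel' hle]
      exact hin

lemma pvSorted_eq (symbol_name : String) (context_lines : Int) (lines : List String) :
    PySem.List.sorted
        ((PySem.List.enumerate lines).foldl (pvAstep symbol_name context_lines (lines.length : Int)) PySem.Set.empty)
        (fun x => x) false
      = ((List.range lines.length).filter (pvMf symbol_name context_lines lines)).map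
          (fun (i : Nat) => (i : Int)) := by
  have hnd1 : ((((List.range lines.length).filter (pvMf symbol_name context_lines lines)).map
      (fun (i : Nat) => (i : Int)))).Nodup :=
    List.Nodup.map (fun a b h => by exact_mod_cast h) ((List.nodup_range).filter _)
  have hnd2 : ((PySem.List.enumerate lines).foldl
      (pvAstep symbol_name context_lines (lines.length : Int)) PySem.Set.empty).Nodup :=
    pvNodup_foldl _ _ _ _ _ List.nodup_nil
  have hmem : ∀ x, x ∈ (((List.range lines.length).filter (pvMf symbol_name context_lines lines)).map
      (fun (i : Nat) => (i : Int))) ↔ x ∈ (PySem.List.enumerate lines).foldl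
      (pvAstep symbol_name context_lines (lines.length : Int)) PySem.Set.empty := by
    intro x
    rw [pvMem_foldl]
    simp only [List.mem_map, List.mem_filter, List.mem_range]
    constructor
    · rintro ⟨i, ⟨hi, hmf⟩, rfl⟩
      right
      rw [pvMf_iff] at hmf
      obtain ⟨j, hj, hin, hb1, hb2⟩ := hmf
      refine ⟨(0 + (j:Int), lines[j]), ?_, hin, by omega, by omega⟩
      rw [PySem.List.mem_enumerate_iff]
      exact ⟨j, hj, rfl⟩
    · rintro (hx | ⟨p, hp, hin, hb1, hb2⟩)
      · simp at hx
      · rw [PySem.List.mem_enumerate_iff] at hp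
        obtain ⟨k, hk, rfl⟩ := hp
        simp only at hin hb1 hb2
        refine ⟨x.toNat, ⟨by omega, ?_⟩, by omega⟩
        rw [pvMf_iff]
        exact ⟨k, hk, hin, by omega, by omega⟩
  have hperm := (List.perm_ext_iff_of_nodup hnd1 hnd2).mpr hmem
  have hpw : List.Pairwise (fun a b => a < b)
      ((((List.range lines.length).filter (pvMf symbol_name context_lines lines)).map
        (fun (i : Nat) => (i : Int)))) :=
    List.Pairwise.map _ (fun a b h => by exact_mod_cast h) ((List.pairwise_lt_range).filter _)
  exact PySem.List.sorted_eq_of_perm_of_pairwise_lt _ _ _ hperm hpw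

-- ---- A-side grouping fold ----

lemma pvAfold (lines : List String) :
    ∀ (xs : List Nat) (ps : List String) (a b : Nat),
      pvFinishA lines ((xs.map (fun (i : Nat) => (i : Int))).foldl (pvAgstep lines) (ps, (a : Int), (b : Int)))
        = ps ++ pvInter lines (pvChunksAux a b xs) := by
  intro xs
  induction xs with
  | nil =>
    intro ps a b
    simp [pvFinishA, pvInter, pvChunksAux, pvEmit]
  | cons x xs ih =>
    intro ps a b
    simp only [List.map_cons, List.foldl_cons, pvAgstep]
    by_cases hx : x = b + 1
    · rw [if_pos (by exact_mod_cast congrArg (fun (k : Nat) => (k : Int)) hx)]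
      rw [show ((x : Nat) : Int) = ((x : Nat) : Int) from rfl]
      have := ih ps a x
      simp only [pvChunksAux, if_pos hx]
      exact this
    · rw [if_neg (by exact_mod_cast fun h => hx (by exact_mod_cast h))]
      rw [ih (ps ++ pvAemit lines (a : Int) (b : Int) ++ ["..."]) x x]
      simp only [pvChunksAux, if_neg hx]
      obtain ⟨r, rs, hr⟩ := List.exists_cons_of_ne_nil (pvChunksAux_ne_nil xs x x)
      rw [hr]
      obtain ⟨rc, rd⟩ := r
      simp [pvInter, pvEmit, List.append_assoc]

-- ---- chunks-from-mask = chunks-of-filtered-indices ----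

lemma pvChunksAux_cons_of_gt (f : List Nat) (a b : Nat)
    (h : ∀ x ∈ f, b + 1 < x) : pvChunksAux a b f = (a, b) :: pvChunks f := by
  cases f with
  | nil => simp [pvChunksAux, pvChunks]
  | cons x xs =>
    have hx : x ≠ b + 1 := by
      have := h x (List.mem_cons_self)
      omega
    simp [pvChunksAux, pvChunks, hx]

lemma pvChunksFrom_eq (m : Nat → Bool) :
    ∀ (r k : Nat) (cur : Option Nat), (∀ a, cur = some a → a < k) →
      pvChunksFrom m cur k r
        = match cur with
          | none => pvChunks (((List.range' k r).filter m))
          | some a => pvChunksAux a (k - 1) ((List.range' k r).filter m) := by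
  intro r
  induction r with
  | zero =>
    intro k cur hc
    cases cur <;> simp [pvChunksFrom, pvChunks, pvChunksAux]
  | succ r ih =>
    intro k cur hc
    rw [List.range'_succ, List.filter_cons]
    cases hm : m k with
    | true =>
      cases cur with
      | none =>
        simp only [pvChunksFrom, hm, if_true, Option.getD_none]
        rw [ih (k + 1) (some k) (fun a ha => by cases ha; omega)]
        simp [pvChunks]
      | some a =>
        have hak : a < k := hc a rfl
        simp only [pvChunksFrom, hm, if_true, Option.getD_some]
        rw [ih (k + 1) (some a) (fun a' ha' => by cases ha'; omega)]
        simp only [Nat.add_sub_cancel]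
        have hk1 : k - 1 + 1 = k := by omega
        conv_rhs => rw [pvChunksAux, hk1, if_pos rfl]
    | false =>
      simp only [pvChunksFrom, hm, Bool.false_eq_true, if_false]
      cases cur with
      | none =>
        rw [ih (k + 1) none (fun a ha => by cases ha)]
        simp
      | some a =>
        have hak : a < k := hc a rfl
        rw [ih (k + 1) none (fun a ha => by cases ha)]
        simp only [List.singleton_append]
        rw [pvChunksAux_cons_of_gt]
        intro x hx
        rw [List.mem_filter] at hx
        have := List.mem_range'.mp hx.1
        omega

-- ---- B-side run-scan fold ----

lemma pvFlush_eq (lines ps : List String) (a k : Nat) (ha : a < k) (hk : k ≤ lines.length) :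
    pvFlush ps (a : Int) ((lines.drop a).take (k - a)) = pvFlushN lines ps (a, k - 1) := by
  have h1 : k - 1 + 1 - a = k - a := by omega
  have h2 : ((lines.drop a).take (k - a)).length = k - a := by
    simp only [List.length_take, List.length_drop]
    omega
  unfold pvFlush pvFlushN
  rw [pvEmit_eq, h1, h2]
  have h3 : (a : Int) + ((k - a : Nat) : Int) = (((k - 1 : Nat) : Int)) + 1 := by omega
  rw [h3]

lemma pvBfold (symbol_name : String) (context_lines : Int) (lines : List String) :
    ∀ (r k : Nat) (ps : List String) (a? : Option Nat),
      k + r = lines.length → (∀ a, a? = some a → a < k) →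
      pvFinishB ((PySem.List.enumerate
          (((List.range' k r).map (pvMf symbol_name context_lines lines)).zip (lines.drop k)) (k : Int)).foldl
        pvBstep (ps, a?.map (fun (a : Nat) => (a : Int)), pvBuf lines a? k))
        = pvPartsAfter lines ps (pvChunksFrom (pvMf symbol_name context_lines lines) a? k r) := by
  intro r
  induction r with
  | zero =>
    intro k ps a? hkr hcur
    simp only [List.range'_zero, List.map_nil, List.zip_nil_left, PySem.List.enumerate_nil,
      List.foldl_nil]
    cases a? with
    | none => simp [pvFinishB, pvChunksFrom, pvPartsAfter]
    | some a =>
      have ha : a < k := hcur a rfl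
      simp only [pvFinishB, pvBuf, Option.map_some]
      rw [pvFlush_eq lines ps a k ha (by omega)]
      simp [pvChunksFrom, pvPartsAfter]
  | succ r ih =>
    intro k ps a? hkr hcur
    have hk : k < lines.length := by omega
    rw [List.range'_succ, List.map_cons, List.drop_eq_getElem_cons hk, List.zip_cons_cons,
      PySem.List.enumerate_cons, List.foldl_cons]
    cases hm : pvMf symbol_name context_lines lines k with
    | true =>
      cases a? with
      | none =>
        simp only [pvBstep, Option.map_none, pvBuf, List.nil_append, if_true]
        have ihk := ih (k + 1) ps (some k) (by omega) (fun a ha => by cases ha; omega)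
        simp only [Option.map_some, pvBuf, Nat.add_sub_cancel_left] at ihk
        rw [List.drop_eq_getElem_cons hk] at ihk
        simp only [List.take_succ_cons, List.take_zero] at ihk
        push_cast at ihk ⊢
        rw [ihk]
        simp [pvChunksFrom, hm]
      | some a =>
        have hak : a < k := hcur a rfl
        simp only [pvBstep, Option.map_some, pvBuf, if_true]
        have ihk := ih (k + 1) ps (some a) (by omega) (fun a' ha' => by cases ha'; omega)
        simp only [Option.map_some, pvBuf] at ihk
        have hgd : (List.drop a lines)[k - a]? = some lines[k] := by
          rw [List.getElem?_drop, show a + (k - a) = k from by omega]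
          exact List.getElem?_eq_getElem hk
        have h1 : List.take (k + 1 - a) (List.drop a lines)
            = List.take (k - a) (List.drop a lines) ++ [lines[k]] := by
          rw [show k + 1 - a = (k - a) + 1 from by omega, List.take_add_one, hgd]
          rfl
        rw [h1] at ihk
        push_cast at ihk ⊢
        rw [ihk]
        simp [pvChunksFrom, hm]
    | false =>
      cases a? with
      | none =>
        simp only [pvBstep, Option.map_none, pvBuf, Bool.false_eq_true, if_false]
        have ihk := ih (k + 1) ps none (by omega) (fun a ha => by cases ha)
        simp only [Option.map_none, pvBuf] at ihk
        push_cast at ihk ⊢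
        rw [ihk]
        simp [pvChunksFrom, hm]
      | some a =>
        have hak : a < k := hcur a rfl
        simp only [pvBstep, Option.map_some, pvBuf, Bool.false_eq_true, if_false]
        rw [pvFlush_eq lines ps a k hak (le_of_lt hk)]
        have ihk := ih (k + 1) (pvFlushN lines ps (a, k - 1)) none (by omega) (fun a ha => by cases ha)
        simp only [Option.map_none, pvBuf] at ihk
        push_cast at ihk ⊢
        rw [ihk]
        simp only [pvChunksFrom, hm, Bool.false_eq_true, if_false, List.singleton_append]
        rfl

lemma pvMask_eq (symbol_name : String) (context_lines : Int) (lines : List String) :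
    (PySem.List.pyRange 0 (lines.length : Int) 1).map (fun i =>
      (PySem.List.slice (lines.map (fun line => PySem.Str.isIn symbol_name line))
        (some (max 0 (i - context_lines)))
        (some (max 0 (min (lines.length : Int) (i + context_lines + 1))))).any id)
      = (List.range' 0 lines.length).map (pvMf symbol_name context_lines lines) := by
  rw [PySem.List.pyRange_one]
  simp only [Int.sub_zero, Int.toNat_natCast]
  rw [List.map_map, ← List.range_eq_range']
  apply List.map_congr_left
  intro k _
  simp [pvMf, Function.comp]

-- ---- main equivalence ----

lemma pvMain_eq (content symbol_name : String) (context_lines : Int) :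
    extract_symbol_usage_py content symbol_name context_lines
      = extract_symbol_usage_py_alt content symbol_name context_lines := by
  simp only [extract_symbol_usage_py, extract_symbol_usage_py_alt]
  generalize (PySem.Str.split? content "\n").getD [] = lines
  rw [pvSorted_eq, pvMask_eq]
  have hB := pvBfold symbol_name context_lines lines lines.length 0 [] none (by omega)
    (fun a ha => by cases ha)
  simp only [Option.map_none, pvBuf, List.drop_zero, Nat.cast_zero] at hB
  rw [hB, pvChunksFrom_eq _ lines.length 0 none (fun a ha => by cases ha),
    pvPartsAfter_nil, ← List.range_eq_range']
  rcases hLf : (List.range lines.length).filter (pvMf symbol_name context_lines lines)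
    with _ | ⟨l0, lt⟩
  · simp [pvChunks, pvInter]
  · simp only [List.map_cons]
    rw [pvAfold lines lt [] l0 l0]
    simp only [List.nil_append, pvChunks]
    have hne := pvInter_ne_nil lines (pvChunksAux l0 l0 lt) (pvChunksAux_ne_nil lt l0 l0)
    simp [hne]

-- ===== VERDICT (by name: the statement is the Claim_ definition above) =====
theorem extract_symbol_usage_py_spec : Claim_equal_extract_symbol_usage_py := by
  intro content symbol_name context_lines _
  unfold Spec_extract_symbol_usage_py
  exact pvMain_eq content symbol_name context_lines
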